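-- pv_equiv track=rewrite | github.com/hoanbka/advanced-algorithms | reverseOddCount.py | reverseOddCount
-- ===== SOURCE A (Python) =====
-- def reverseOddCount(s):
--     o = {}
--     a = list(s)
--
--     for i in range(len(a)):
--         if a[i] in o.keys():
--             o[a[i]] += 1
--         else:
--             o[a[i]] = 1
--
--     j = len(a)-1
--     i = 0
--     while i < j:
--
--         if o[a[i]] % 2 != 0:
--             if o[a[j]] % 2 != 0:
--                 [a[i], a[j]] = [a[j], a[i]]
--                 i+=1
--                 j-=1
--             else:
--                 j-=1
--         else:
--             i+=1
--
--         pass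
--     return ''.join(a)
-- ===== SOURCE B (Python) =====
-- def reverseOddCount(s):
--     cnt = {}
--     for ch in s:
--         cnt[ch] = cnt.get(ch, 0) + 1
--     vals = [ch for ch in reversed(s) if cnt[ch] % 2 == 1]
--     out = []
--     for ch in s:
--         if cnt[ch] % 2 == 1 and vals:
--             out.append(vals.pop(0))
--         else:
--             out.append(ch)
--     return ''.join(out)
-- ===== Notes on version B (the rewrite author's own statement) =====
-- stated objective: simpler
-- what changed: Replaces A's interleaved two-pointer swap loop (indices moving inward with in-place swaps) by a two-pass decomposition: collect the odd-count characters in reverse order, then a single forward pass writes them back at the odd-count positions.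
import Mathlib
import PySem

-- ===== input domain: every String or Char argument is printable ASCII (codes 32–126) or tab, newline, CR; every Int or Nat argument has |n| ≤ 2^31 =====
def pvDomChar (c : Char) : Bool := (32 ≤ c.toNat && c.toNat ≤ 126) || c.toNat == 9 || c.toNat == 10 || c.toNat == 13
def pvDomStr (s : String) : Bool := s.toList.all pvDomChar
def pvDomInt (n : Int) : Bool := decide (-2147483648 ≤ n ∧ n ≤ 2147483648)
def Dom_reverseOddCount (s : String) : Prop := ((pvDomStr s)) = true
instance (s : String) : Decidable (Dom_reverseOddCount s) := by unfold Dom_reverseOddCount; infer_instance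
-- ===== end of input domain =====

-- B replaces A's interleaved two-pointer swap loop by a collect-reversed-values pass plus one
-- forward write-back pass (objective: simpler decomposition; same asymptotic cost).

-- ===== PORT A =====
-- the counting for-loop of A ('for i in range(len(a)): if a[i] in o.keys(): …');
-- pyGetD's default is never used: range indices are in range.
def pvCountA (a : List Char) : PySem.Dict Char Int :=
  (PySem.List.pyRange 0 (a.length : Int) 1).foldl
    (fun o i =>
      if o.contains (PySem.List.pyGetD a i ' ') then
        o.insert (PySem.List.pyGetD a i ' ') (o.getD (PySem.List.pyGetD a i ' ') 0 + 1)
      else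
        o.insert (PySem.List.pyGetD a i ' ') 1)
    PySem.Dict.empty

-- A's while loop; the getD defaults (' ' and 0) are totality guards: while 0 ≤ i < j < len a
-- the indices are in range and every a[i] is a key of o, exactly as in the Python.
def pvLoopA (o : PySem.Dict Char Int) (a : List Char) (i j : Int) : List Char :=
  if h : i < j then
    if PySem.Int.mod (o.getD (PySem.List.pyGetD a i ' ') 0) 2 ≠ 0 then
      if PySem.Int.mod (o.getD (PySem.List.pyGetD a j ' ') 0) 2 ≠ 0 then
        pvLoopA o
          (PySem.List.pySetD (PySem.List.pySetD a i (PySem.List.pyGetD a j ' ')) j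
            (PySem.List.pyGetD a i ' '))
          (i + 1) (j - 1)
      else
        pvLoopA o a i (j - 1)
    else
      pvLoopA o a (i + 1) j
  else a
termination_by (j - i).toNat
decreasing_by all_goals omega

def reverseOddCount (s : String) : String :=
  String.mk (pvLoopA (pvCountA s.toList) s.toList 0 ((s.toList.length : Int) - 1))

-- ===== PORT B =====
-- 'cnt[ch] = cnt.get(ch, 0) + 1'
def pvCountB (l : List Char) : PySem.Dict Char Int :=
  l.foldl (fun d ch => d.insert ch (d.getD ch 0 + 1)) PySem.Dict.empty

-- the test 'cnt[ch] % 2 == 1'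
def pvOdd (cnt : PySem.Dict Char Int) (ch : Char) : Bool :=
  PySem.Int.mod (cnt.getD ch 0) 2 == 1

-- B's write-back loop: 'if cnt[ch] % 2 == 1 and vals: out.append(vals.pop(0)) else: out.append(ch)'
def pvFill (cnt : PySem.Dict Char Int) : List Char → List Char → List Char → List Char
  | [], _, out => out
  | ch :: rest, [], out => pvFill cnt rest [] (out ++ [ch])
  | ch :: rest, v :: vs, out =>
    if pvOdd cnt ch then pvFill cnt rest vs (out ++ [v])
    else pvFill cnt rest (v :: vs) (out ++ [ch])

def reverseOddCount_alt (s : String) : String :=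
  String.mk
    (pvFill (pvCountB s.toList) s.toList
      (s.toList.reverse.filter (fun ch => pvOdd (pvCountB s.toList) ch)) [])

-- ===== PRECONDITION & SPEC =====
def Spec_reverseOddCount (s : String) (out : String) : Prop := out = reverseOddCount_alt s
instance (s : String) (out : String) : Decidable (Spec_reverseOddCount s out) := by unfold Spec_reverseOddCount; infer_instance

-- ===== CLAIM (what is proved, stated in full; the proofs are below) =====
def Claim_equal_reverseOddCount : Prop := ∀ (s : String), Dom_reverseOddCount s → Spec_reverseOddCount s (reverseOddCount s)

-- ===== LEMMAS AND PROOFS =====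

-- getD / set at the junction of an append
theorem pvGetD_app (pre : List Char) (x : Char) (t : List Char) (d : Char) :
    (pre ++ x :: t).getD pre.length d = x := by
  induction pre with
  | nil => rfl
  | cons a pre ih => simpa using ih

theorem pvSet_app (pre : List Char) (x : Char) (t : List Char) (v : Char) :
    (pre ++ x :: t).set pre.length v = pre ++ v :: t := by
  induction pre with
  | nil => rfl
  | cons a pre ih => simpa using ih

-- the accumulator of pvFill only prefixes the result
theorem pvFill_out (cnt : PySem.Dict Char Int) :
    ∀ (l vals out : List Char), pvFill cnt l vals out = out ++ pvFill cnt l vals [] := by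
  intro l
  induction l with
  | nil => intro vals out; simp [pvFill]
  | cons ch rest ih =>
    intro vals out
    cases vals with
    | nil =>
      rw [pvFill, pvFill, ih, ih (out := [] ++ [ch])]
      simp
    | cons v vs =>
      by_cases h : pvOdd cnt ch = true
      · rw [pvFill, pvFill, if_pos h, if_pos h, ih, ih (out := [] ++ [v])]
        simp
      · rw [pvFill, pvFill, if_neg h, if_neg h, ih, ih (out := [] ++ [ch])]
        simp

theorem pvFill_cons_neg (cnt : PySem.Dict Char Int) (ch : Char) (rest vals : List Char)
    (h : ¬ pvOdd cnt ch = true) :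
    pvFill cnt (ch :: rest) vals [] = ch :: pvFill cnt rest vals [] := by
  cases vals with
  | nil => rw [pvFill, pvFill_out]; simp
  | cons v vs => rw [pvFill, if_neg h, pvFill_out]; simp

theorem pvFill_cons_pos (cnt : PySem.Dict Char Int) (ch : Char) (rest : List Char)
    (v : Char) (vs : List Char) (h : pvOdd cnt ch = true) :
    pvFill cnt (ch :: rest) (v :: vs) [] = v :: pvFill cnt rest vs [] := by
  rw [pvFill, if_pos h, pvFill_out]; simp

-- a trailing non-odd character passes through unchanged
theorem pvFill_pass (cnt : PySem.Dict Char Int) (y : Char) (hy : ¬ pvOdd cnt y = true) :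
    ∀ (l vals : List Char), pvFill cnt (l ++ [y]) vals [] = pvFill cnt l vals [] ++ [y] := by
  intro l
  induction l with
  | nil =>
    intro vals
    cases vals with
    | nil => simp [pvFill]
    | cons v vs => simp [pvFill, hy]
  | cons ch rest ih =>
    intro vals
    cases vals with
    | nil =>
      rw [List.cons_append, pvFill, pvFill, pvFill_out, pvFill_out cnt rest]
      simp [ih]
    | cons v vs =>
      by_cases h : pvOdd cnt ch = true
      · rw [List.cons_append, pvFill, pvFill, if_pos h, if_pos h,
          pvFill_out, pvFill_out cnt rest]
        simp [ih]
      · rw [List.cons_append, pvFill, pvFill, if_neg h, if_neg h,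
          pvFill_out, pvFill_out cnt rest]
        simp [ih]

-- a trailing odd character consumes the last pending value
theorem pvFill_consume (cnt : PySem.Dict Char Int) (y x : Char) (hy : pvOdd cnt y = true) :
    ∀ (l vals : List Char), vals.length = l.countP (fun c => pvOdd cnt c) →
      pvFill cnt (l ++ [y]) (vals ++ [x]) [] = pvFill cnt l vals [] ++ [x] := by
  intro l
  induction l with
  | nil =>
    intro vals hlen
    have : vals = [] := by simpa using hlen
    subst this
    simp [pvFill, hy]
  | cons ch rest ih =>
    intro vals hlen
    by_cases h : pvOdd cnt ch = true
    · obtain ⟨v, vs, rfl⟩ : ∃ v vs, vals = v :: vs := by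
        cases vals with
        | nil =>
          exfalso
          rw [List.countP_cons] at hlen
          simp [h] at hlen
        | cons v vs => exact ⟨v, vs, rfl⟩
      rw [List.cons_append, show (v :: vs) ++ [x] = v :: (vs ++ [x]) by simp,
        pvFill_cons_pos _ _ _ _ _ h, pvFill_cons_pos _ _ _ _ _ h, ih]
      · simp
      · rw [List.countP_cons] at hlen
        simp [h] at hlen
        omega
    · have hlen' : vals.length = rest.countP (fun c => pvOdd cnt c) := by
        rw [List.countP_cons] at hlen
        simpa [h] using hlen
      rw [List.cons_append, pvFill_cons_neg _ _ _ _ h, ih vals hlen',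
        pvFill_cons_neg _ _ _ _ h]
      simp

-- the two parity tests agree when the dict values are the counts
theorem pvOdd_iff (cnt : PySem.Dict Char Int) (hc : ∀ c, ∃ n : Nat, cnt.getD c 0 = (n : Int)) (c : Char) :
    (PySem.Int.mod (cnt.getD c 0) 2 ≠ 0) ↔ pvOdd cnt c = true := by
  obtain ⟨n, hn⟩ := hc c
  rw [pvOdd, hn, PySem.Int.mod_eq_emod_of_pos (by omega : (0:Int) < 2)]
  simp only [ne_eq, beq_iff_eq]
  omega

-- THE WINDOW INVARIANT: on window mid between finished prefix pre and suffix post, A's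
-- two-pointer loop produces exactly B's fill of mid with mid's odd characters reversed.
theorem pvWindow (cnt : PySem.Dict Char Int)
    (hq : ∀ c, (PySem.Int.mod (cnt.getD c 0) 2 ≠ 0) ↔ pvOdd cnt c = true) :
    ∀ (n : Nat) (mid pre post : List Char), mid.length = n →
      pvLoopA cnt (pre ++ mid ++ post) (pre.length : Int)
          ((pre.length : Int) + (mid.length : Int) - 1)
        = pre ++ pvFill cnt mid (mid.reverse.filter (fun c => pvOdd cnt c)) [] ++ post := by
  intro n
  induction n using Nat.strong_induction_on with
  | _ n ih =>
    intro mid pre post hmid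
    rcases mid with _ | ⟨x, rest⟩
    · rw [pvLoopA, dif_neg (by simp)]
      simp [pvFill]
    · rcases List.eq_nil_or_concat rest with rfl | ⟨m, y, rfl⟩
      · rw [pvLoopA, dif_neg (by simp)]
        by_cases h : pvOdd cnt x = true
        · simp [h, pvFill, pvFill_out]
        · simp [h, pvFill, pvFill_out]
      · rw [List.concat_eq_append] at *
        subst hmid
        have hx' : PySem.List.pyGetD (pre ++ (x :: (m ++ [y])) ++ post) (pre.length : Int) ' ' = x := by
          rw [show pre ++ (x :: (m ++ [y])) ++ post = pre ++ x :: (m ++ [y] ++ post) from by simp,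
            PySem.List.pyGetD_natCast]
          exact pvGetD_app pre x _ ' '
        have hjn : ((pre.length : Int) + ((x :: (m ++ [y])).length : Int) - 1)
            = (((pre ++ x :: m).length : Nat) : Int) := by
          simp only [List.length_cons, List.length_append, List.length_nil]
          push_cast
          omega
        have hy' : PySem.List.pyGetD (pre ++ (x :: (m ++ [y])) ++ post)
            ((pre.length : Int) + ((x :: (m ++ [y])).length : Int) - 1) ' ' = y := by
          rw [hjn, show pre ++ (x :: (m ++ [y])) ++ post = (pre ++ x :: m) ++ y :: post from by simp,
            PySem.List.pyGetD_natCast]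
          exact pvGetD_app _ y _ ' '
        rw [pvLoopA]
        rw [dif_pos (by
          simp only [List.length_cons, List.length_append, List.length_nil]
          push_cast
          omega)]
        rw [hx', hy']
        by_cases hxb : pvOdd cnt x = true
        · by_cases hyb : pvOdd cnt y = true
          · rw [if_pos ((hq x).mpr hxb), if_pos ((hq y).mpr hyb)]
            -- the swap branch
            have hjn2 : ((pre.length : Int) + ((x :: (m ++ [y])).length : Int) - 1)
                = (((pre ++ y :: m).length : Nat) : Int) := by
              simp only [List.length_cons, List.length_append, List.length_nil]
              push_cast
              omega
            have hset : PySem.List.pySetD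
                (PySem.List.pySetD (pre ++ (x :: (m ++ [y])) ++ post) (pre.length : Int) y)
                ((pre.length : Int) + ((x :: (m ++ [y])).length : Int) - 1) x
                = (pre ++ [y]) ++ m ++ (x :: post) := by
              rw [show pre ++ (x :: (m ++ [y])) ++ post = pre ++ x :: (m ++ [y] ++ post) from by simp,
                PySem.List.pySetD_natCast, pvSet_app, hjn2,
                show pre ++ y :: (m ++ [y] ++ post) = (pre ++ y :: m) ++ y :: post from by simp,
                PySem.List.pySetD_natCast, pvSet_app]
              simp only [List.append_assoc, List.cons_append, List.nil_append]
            rw [hset]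
            have hidx1 : (pre.length : Int) + 1 = (((pre ++ [y]).length : Nat) : Int) := by
              simp
            have hidx2 : ((pre.length : Int) + ((x :: (m ++ [y])).length : Int) - 1) - 1
                = (((pre ++ [y]).length : Nat) : Int) + ((m.length : Nat) : Int) - 1 := by
              simp only [List.length_cons, List.length_append, List.length_nil]
              push_cast
              omega
            rw [hidx1, hidx2, ih m.length (by simp) m (pre ++ [y]) (x :: post) rfl]
            have hvals : ((x :: (m ++ [y])).reverse.filter (fun c => pvOdd cnt c))
                = y :: ((m.reverse.filter (fun c => pvOdd cnt c)) ++ [x]) := by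
              simp [List.filter_append, hxb, hyb]
            rw [hvals, pvFill_cons_pos _ _ _ _ _ hxb,
              pvFill_consume cnt y x hyb m _
                (by rw [← List.countP_eq_length_filter, List.countP_reverse])]
            simp only [List.append_assoc, List.cons_append, List.nil_append]
          · rw [if_pos ((hq x).mpr hxb), if_neg (fun hcon => hyb ((hq y).mp hcon))]
            -- j moves left: y is finished in place
            have hidx : ((pre.length : Int) + ((x :: (m ++ [y])).length : Int) - 1) - 1
                = (pre.length : Int) + (((x :: m).length : Nat) : Int) - 1 := by
              simp only [List.length_cons, List.length_append, List.length_nil]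
              push_cast
              omega
            rw [hidx,
              show pre ++ (x :: (m ++ [y])) ++ post = pre ++ (x :: m) ++ (y :: post) from by simp,
              ih (x :: m).length (by simp) (x :: m) pre (y :: post) rfl]
            have hvals : ((x :: (m ++ [y])).reverse.filter (fun c => pvOdd cnt c))
                = ((x :: m).reverse.filter (fun c => pvOdd cnt c)) := by
              simp [List.filter_append, hyb]
            rw [hvals, show (x :: (m ++ [y]) : List Char) = (x :: m) ++ [y] from by simp,
              pvFill_pass cnt y hyb]
            simp only [List.append_assoc, List.cons_append, List.nil_append]
        · rw [if_neg (fun hcon => hxb ((hq x).mp hcon))]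
          -- i moves right: x is finished in place
          have hidx1 : (pre.length : Int) + 1 = (((pre ++ [x]).length : Nat) : Int) := by simp
          have hidx2 : ((pre.length : Int) + ((x :: (m ++ [y])).length : Int) - 1)
              = (((pre ++ [x]).length : Nat) : Int) + (((m ++ [y]).length : Nat) : Int) - 1 := by
            simp only [List.length_cons, List.length_append, List.length_nil]
            push_cast
            omega
          rw [hidx1, hidx2,
            show pre ++ (x :: (m ++ [y])) ++ post = (pre ++ [x]) ++ (m ++ [y]) ++ post from by simp,
            ih (m ++ [y]).length (by simp) (m ++ [y]) (pre ++ [x]) post rfl]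
          have hxf : pvOdd cnt x = false := by simpa using hxb
          have hvals : ((x :: (m ++ [y])).reverse.filter (fun c => pvOdd cnt c))
              = ((m ++ [y]).reverse.filter (fun c => pvOdd cnt c)) := by
            rw [show ((x :: (m ++ [y])).reverse : List Char) = (y :: m.reverse) ++ [x] from by simp,
              List.filter_append,
              show (((m ++ [y]).reverse : List Char)) = y :: m.reverse from by simp]
            simp [hxf]
          rw [hvals, pvFill_cons_neg cnt x (m ++ [y]) _ hxb]
          simp only [List.append_assoc, List.cons_append, List.nil_append]

-- both counting loops build collections.Counter
theorem pvCountA_eq (a : List Char) : pvCountA a = PySem.Dict.counter a := by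
  have h1 : pvCountA a
      = a.foldl (fun (o : PySem.Dict Char Int) c =>
          if o.contains c then o.insert c (o.getD c 0 + 1) else o.insert c 1)
          PySem.Dict.empty :=
    PySem.List.foldl_pyRange_zero_pyGetD' a ' '
      (fun (o : PySem.Dict Char Int) c =>
        if o.contains c then o.insert c (o.getD c 0 + 1) else o.insert c 1)
      PySem.Dict.empty
  have h2 := PySem.List.foldl_congr_mem a
    (fun (o : PySem.Dict Char Int) c =>
      if o.contains c then o.insert c (o.getD c 0 + 1) else o.insert c 1)
    (fun (d : PySem.Dict Char Int) c => d.insert c (d.getD c 0 + 1))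
    PySem.Dict.empty
    (by
      intro d c _
      by_cases h : d.contains c = true
      · simp [h]
      · simp [h, PySem.Dict.getD_of_not_contains d 0 (by simpa using h)])
  rw [h1, h2, PySem.Dict.foldl_insert_getD_add_one_eq_counter]

theorem pvCountB_eq (l : List Char) : pvCountB l = PySem.Dict.counter l := by
  rw [pvCountB, PySem.Dict.foldl_insert_getD_add_one_eq_counter]

theorem pvCounter_vals (l : List Char) :
    ∀ c, ∃ n : Nat, (PySem.Dict.counter l).getD c 0 = (n : Int) := by
  intro c
  exact ⟨l.count c, by rw [PySem.Dict.getD_counter]⟩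

-- ===== VERDICT (by name: the statement is the Claim_ definition above) =====
theorem reverseOddCount_spec : Claim_equal_reverseOddCount := by
  intro s _
  unfold Spec_reverseOddCount reverseOddCount reverseOddCount_alt
  rw [pvCountA_eq, pvCountB_eq]
  have h := pvWindow (PySem.Dict.counter s.toList)
    (pvOdd_iff _ (pvCounter_vals s.toList)) s.toList.length s.toList [] [] rfl
  simp only [List.nil_append, List.append_nil, List.length_nil, Nat.cast_zero, zero_add] at h
  rw [h]
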